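-- pv_equiv track=rewrite | github.com/suxrobjongofurjonov/5-month | 7-dars/1.py | add_func
-- ===== SOURCE A (Python) =====
-- def add_func(my_l):
--     res={}
--     res1=[]
--
--     for var, i in enumerate(reversed(my_l)):
--         if i in res:
--             res1.insert(0, '_')
--         else:
--             res1.insert(0, i)
--             res[i] = var
--
--     return res1
-- ===== SOURCE B (Python) =====
-- def add_func(my_l):
--     last = {}
--     for k, v in enumerate(my_l):
--         last[v] = k
--     return [v if last[v] == k else '_' for k, v in enumerate(my_l)]
-- ===== Notes on version B (the rewrite author's own statement) =====
-- stated objective: faster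
-- what changed: Replaced A's reverse pass with a seen-dict and repeated insert(0) by two forward passes: build a last-index table once, then keep each element iff its index equals its value's last index.
import Mathlib
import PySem

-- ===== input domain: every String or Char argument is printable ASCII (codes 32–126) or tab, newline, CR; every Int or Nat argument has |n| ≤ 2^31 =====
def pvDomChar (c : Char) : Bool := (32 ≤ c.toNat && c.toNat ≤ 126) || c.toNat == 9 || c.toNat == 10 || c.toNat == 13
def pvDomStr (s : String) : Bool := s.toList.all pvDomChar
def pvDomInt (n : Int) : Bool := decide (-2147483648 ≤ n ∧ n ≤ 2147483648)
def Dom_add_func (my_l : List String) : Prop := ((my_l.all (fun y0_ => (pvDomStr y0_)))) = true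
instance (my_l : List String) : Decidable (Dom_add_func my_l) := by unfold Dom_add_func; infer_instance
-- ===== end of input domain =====

-- B replaces A's reverse pass with a seen-dict and repeated insert(0) by two forward
-- passes: build a last-index table once, then keep each element iff its index is the
-- last index of its value (faster: no O(n) insert(0) per element).


-- ===== PORT A =====
-- loop over enumerate(reversed(my_l)); res1.insert(0, …) is cons onto the accumulator
def add_func_go : List String → PySem.Dict String Int → Int → List String → List String
  | [], _, _, res1 => res1
  | i :: rest, res, var, res1 =>
    if res.contains i then
      add_func_go rest res (var + 1) ("_" :: res1)
    else
      add_func_go rest (res.insert i var) (var + 1) (i :: res1)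

def add_func (my_l : List String) : List String :=
  add_func_go my_l.reverse PySem.Dict.empty 0 []

-- ===== PORT B =====
-- first pass: last[v] = k for every (k, v); second pass: keep v iff last[v] == k
-- (last[v] always succeeds in Python since v was inserted; ported as get? == some k)
def add_func_alt (my_l : List String) : List String :=
  let last := (PySem.List.enumerate my_l 0).foldl (fun d p => d.insert p.2 p.1) PySem.Dict.empty
  (PySem.List.enumerate my_l 0).map (fun p => if last.get? p.2 == some p.1 then p.2 else "_")

-- ===== PRECONDITION & SPEC =====
def Spec_add_func (my_l : List String) (out : List String) : Prop := out = add_func_alt my_l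
instance (my_l : List String) (out : List String) : Decidable (Spec_add_func my_l out) := by unfold Spec_add_func; infer_instance

-- ===== CLAIM (what is proved, stated in full; the proofs are below) =====
def Claim_equal_add_func : Prop := ∀ (my_l : List String), Dom_add_func my_l → Spec_add_func my_l (add_func my_l)

-- ===== LEMMAS AND PROOFS =====

-- common reference: mark each element '_' iff it reappears later, with an extra 'seen' predicate for A's dict
def cSeen (s : String → Bool) : List String → List String
  | [] => []
  | x :: xs => (if s x || xs.contains x then "_" else x) :: cSeen s xs

theorem cSeen_congr {s t : String → Bool} (h : ∀ x, s x = t x) (l : List String) :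
    cSeen s l = cSeen t l := by
  induction l with
  | nil => rfl
  | cons x xs ih => simp [cSeen, h, ih]

theorem cSeen_append_singleton (s : String → Bool) (ys : List String) (x : String) :
    cSeen s (ys ++ [x]) = cSeen (fun e => e == x || s e) ys ++ [if s x then "_" else x] := by
  induction ys with
  | nil => simp [cSeen]
  | cons y ys ih =>
    simp only [List.cons_append, cSeen, ih, List.contains_append]
    congr 1
    have : (y == x || s y || ys.contains y) = (s y || (ys.contains y || List.contains [x] y)) := by
      simp only [List.contains_cons, List.contains_nil, Bool.or_false, Bool.beq_comm]
      cases s y <;> cases x == y <;> cases ys.contains y <;> rfl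
    rw [this]

theorem add_func_go_eq (r : List String) :
    ∀ (d : PySem.Dict String Int) (var : Int) (acc : List String),
      add_func_go r d var acc = cSeen (fun e => d.contains e) r.reverse ++ acc := by
  induction r with
  | nil => intro d var acc; rfl
  | cons x xs ih =>
    intro d var acc
    simp only [add_func_go, List.reverse_cons, cSeen_append_singleton]
    by_cases hx : d.contains x = true
    · rw [if_pos hx, ih, hx]
      have : ∀ e, (e == x || d.contains e) = d.contains e := by
        intro e
        by_cases he : (e == x) = true
        · rw [he]; simp [(eq_of_beq he) ▸ hx]
        · simp [Bool.eq_false_iff.mpr he]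
      rw [cSeen_congr this]
      simp
    · rw [if_neg hx, ih]
      have : ∀ e, ((d.insert x var).contains e) = (e == x || d.contains e) := by
        intro e; exact PySem.Dict.contains_insert d x e var
      rw [cSeen_congr this]
      simp [Bool.eq_false_iff.mpr hx]

-- B side: last index of v in xs (as an offset), matching the overwriting dict build
def lastIdx : List String → String → Option Int
  | [], _ => none
  | x :: xs, v =>
    match lastIdx xs v with
    | some j => some (j + 1)
    | none => if v == x then some 0 else none

theorem lastIdx_none_iff (xs : List String) (v : String) :
    lastIdx xs v = none ↔ xs.contains v = false := by
  induction xs with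
  | nil => simp [lastIdx]
  | cons x xs ih =>
    simp only [lastIdx, List.contains_cons]
    cases h : lastIdx xs v with
    | some j =>
      have hc : xs.contains v = true := by
        cases hcc : xs.contains v with
        | true => rfl
        | false => rw [← ih, h] at hcc; exact absurd hcc (by simp)
      simp only [List.contains_eq_mem, decide_eq_true_eq] at hc
      simp
      exact fun _ => hc
    | none =>
      have hc := ih.mp h
      simp only [List.contains_eq_mem, decide_eq_false_iff_not] at hc
      by_cases hv : (v == x) = true <;> simp [hv, hc]

theorem lastIdx_nonneg (xs : List String) (v : String) :
    ∀ j, lastIdx xs v = some j → 0 ≤ j := by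
  induction xs with
  | nil => intro j h; simp [lastIdx] at h
  | cons x xs ih =>
    intro j h
    simp only [lastIdx] at h
    cases hx : lastIdx xs v with
    | some j' =>
      rw [hx] at h; simp only [Option.some.injEq] at h
      have := ih j' hx; omega
    | none =>
      rw [hx] at h
      by_cases hv : (v == x) = true <;> simp [hv] at h
      omega

theorem fold_get (xs : List String) :
    ∀ (s : Int) (d0 : PySem.Dict String Int) (v : String),
      ((PySem.List.enumerate xs s).foldl (fun d p => d.insert p.2 p.1) d0).get? v
        = match lastIdx xs v with
          | some j => some (s + j)
          | none => d0.get? v := by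
  induction xs with
  | nil => intro s d0 v; simp [PySem.List.enumerate_nil, lastIdx]
  | cons x xs ih =>
    intro s d0 v
    rw [PySem.List.enumerate_cons]
    simp only [List.foldl_cons, lastIdx, ih]
    cases hx : lastIdx xs v with
    | some j => simp only; congr 1; omega
    | none =>
      simp only
      by_cases hv : v = x
      · subst hv; simp [PySem.Dict.get?_insert_self]
      · simp [PySem.Dict.get?_insert_of_ne d0 s hv, hv]

theorem mapB (xs : List String) :
    ∀ (s : Int) (D : PySem.Dict String Int),
      (∀ v, v ∈ xs → D.get? v = (lastIdx xs v).map (fun j => s + j)) →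
      (PySem.List.enumerate xs s).map (fun p => if D.get? p.2 == some p.1 then p.2 else "_")
        = cSeen (fun _ => false) xs := by
  induction xs with
  | nil => intro s D _; simp [PySem.List.enumerate_nil, cSeen]
  | cons x xs ih =>
    intro s D h
    rw [PySem.List.enumerate_cons]
    simp only [List.map_cons, cSeen, Bool.false_or]
    congr 1
    · have hx := h x (List.mem_cons_self ..)
      simp only [lastIdx] at hx
      cases hc : xs.contains x with
      | true =>
        have : lastIdx xs x ≠ none := by
          intro hn; rw [(lastIdx_none_iff xs x).mp hn] at hc; exact Bool.false_ne_true hc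
        obtain ⟨j, hj⟩ := Option.ne_none_iff_exists'.mp this
        rw [hj] at hx
        have hj0 := lastIdx_nonneg xs x j hj
        simp only [Option.map_some] at hx
        rw [hx]
        have : (some (s + (j + 1)) == some s) = false := by
          simp only [beq_eq_false_iff_ne, ne_eq, Option.some.injEq]
          omega
        simp [this]
      | false =>
        have hn := (lastIdx_none_iff xs x).mpr hc
        rw [hn] at hx
        simp at hx
        simp [hx]
    · apply ih (s + 1) D
      intro v hv
      have := h v (List.mem_cons_of_mem x hv)
      cases hj : lastIdx xs v with
      | some j =>
        simp only [lastIdx, hj, Option.map_some] at this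
        simp only [Option.map_some]
        rw [this]; congr 1; omega
      | none =>
        exfalso
        have := (lastIdx_none_iff xs v).mp hj
        simp only [List.contains_eq_mem, decide_eq_false_iff_not] at this
        exact this hv

theorem alt_eq_cSeen (l : List String) : add_func_alt l = cSeen (fun _ => false) l := by
  unfold add_func_alt
  apply mapB
  intro v hv
  rw [fold_get]
  cases hj : lastIdx l v with
  | some j => simp
  | none =>
    exfalso
    have := (lastIdx_none_iff l v).mp hj
    simp only [List.contains_eq_mem, decide_eq_false_iff_not] at this
    exact this hv

-- ===== VERDICT (by name: the statement is the Claim_ definition above) =====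
theorem add_func_spec : Claim_equal_add_func := by
  intro my_l _
  show add_func my_l = add_func_alt my_l
  rw [add_func, add_func_go_eq, List.append_nil, List.reverse_reverse,
    cSeen_congr (fun e => PySem.Dict.contains_empty (κ := String) (ν := Int) e), alt_eq_cSeen]
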